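-- pv_equiv track=rewrite | github.com/PruthweeshaSA/LeetCodeSolutions | LeetCodeReorderEdges.py | addNeighbors
-- ===== SOURCE A (Python) =====
-- def addNeighbors(connected,node,ancestors,descendants,countReorders):
--     while node in ancestors and len(ancestors[node]) > 0:
--         ancestor = ancestors[node].pop()
--         if ancestor in descendants and node in descendants[ancestor]:
--             descendants[ancestor].remove(node)
--         connected.add(ancestor)
--         countReorders = addNeighbors(connected,ancestor,ancestors,descendants,countReorders)
--     if node in ancestors:
--         ancestors.pop(node)
--
--     while node in descendants and len(descendants[node]) > 0:
--         descendant = descendants[node].pop()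
--         if descendant in ancestors and node in ancestors[descendant]:
--             ancestors[descendant].remove(node)
--         if descendant not in connected:
--             connected.add(descendant)
--             countReorders += 1
--         countReorders = addNeighbors(connected,descendant,ancestors,descendants,countReorders)
--     if node in descendants:
--         descendants.pop(node)
--     return countReorders
-- ===== SOURCE B (Python) =====
-- def addNeighbors(connected, node, ancestors, descendants, countReorders):
--     # Iterative explicit-stack DFS with ONE generic phase body: each frame is
--     # (node, descPhase); the primary/secondary dicts are swapped by the phase,
--     # so the ancestor-drain and descendant-drain code exists only once.
--     stack = [(node, False)]
--     while stack:
--         n, descPhase = stack.pop()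
--         prim, sec = (descendants, ancestors) if descPhase else (ancestors, descendants)
--         if n in prim and prim[n]:
--             x = prim[n].pop()
--             if x in sec and n in sec[x]:
--                 sec[x].remove(n)
--             if x not in connected:
--                 connected.add(x)
--                 if descPhase:
--                     countReorders += 1
--             stack.append((n, descPhase))
--             stack.append((x, False))
--         else:
--             if n in prim:
--                 del prim[n]
--             if not descPhase:
--                 stack.append((n, True))
--     return countReorders
-- ===== Notes on version B (the rewrite author's own statement) =====
-- stated objective: alternative
-- what changed: The recursive DFS with two specialized while-loops is replaced by an iterative explicit-stack machine whose single generic phase body drains either dict by swapping a primary/secondary pair, performing the same mutations in the same order; B also avoids Python RecursionError on deep graphs.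
import Mathlib
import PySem

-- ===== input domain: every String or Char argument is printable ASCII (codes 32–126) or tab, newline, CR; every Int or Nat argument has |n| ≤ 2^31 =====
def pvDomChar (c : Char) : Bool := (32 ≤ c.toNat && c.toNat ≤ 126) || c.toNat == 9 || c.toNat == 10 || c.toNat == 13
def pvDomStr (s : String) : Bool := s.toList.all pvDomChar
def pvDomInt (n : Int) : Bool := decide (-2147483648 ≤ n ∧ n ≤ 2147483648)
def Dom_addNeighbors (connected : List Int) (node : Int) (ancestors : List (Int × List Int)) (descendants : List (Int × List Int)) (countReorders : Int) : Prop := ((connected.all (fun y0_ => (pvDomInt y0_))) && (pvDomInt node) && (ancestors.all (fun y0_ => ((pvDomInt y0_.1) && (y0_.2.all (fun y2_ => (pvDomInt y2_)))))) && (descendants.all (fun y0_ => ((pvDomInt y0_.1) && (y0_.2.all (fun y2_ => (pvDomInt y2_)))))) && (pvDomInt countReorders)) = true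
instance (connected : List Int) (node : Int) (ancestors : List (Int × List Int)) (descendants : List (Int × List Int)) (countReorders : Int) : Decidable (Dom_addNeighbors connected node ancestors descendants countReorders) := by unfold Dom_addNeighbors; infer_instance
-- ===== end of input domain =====

-- B replaces A's recursion (two specialized while-loops) by an iterative explicit-stack machine
-- with one generic phase body (primary/secondary dict swap), same mutations in the same order;
-- the equivalence proved here is about the RETURN value only — both Pythons also mutate
-- `connected`/`ancestors`/`descendants` in place (identically, but that is not claimed here).

-- ===== PORT A =====
-- state threaded through the recursion: (connected, ancestors, descendants, countReorders)
abbrev pvSt : Type := List Int × PySem.Dict Int (List Int) × PySem.Dict Int (List Int) × Int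

-- fuel bound: twice the total number of list elements stored in the two dicts, plus 2
-- (a totality guard only; proved sufficient below — each loop iteration pops one element)
def pvFuelA (ancestors descendants : List (Int × List Int)) : Nat :=
  2 * ((ancestors.map (fun p => p.2.length)).sum + (descendants.map (fun p => p.2.length)).sum) + 2

mutual
-- the body of `addNeighbors`: ancestors-while (incl. its key deletion), then descendants-while
def pvGoA : Nat → Int → pvSt → Option pvSt
  | 0, _, _ => none
  | f+1, n, s => (pvAncA f n s).bind (fun s1 => pvDescA f n s1)

-- `while node in ancestors and len(ancestors[node]) > 0: …` and the `if node in ancestors: ancestors.pop(node)`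
def pvAncA : Nat → Int → pvSt → Option pvSt
  | 0, _, _ => none
  | f+1, n, (c, a, d, k) =>
    match a.get? n with
    | some l =>
      match PySem.List.pop? l with
      | some (x, l') =>
        let a1 := a.insert n l'
        let d1 := match d.get? x with
          | some m => if m.contains n then d.insert x ((PySem.List.remove? m n).getD m) else d
          | none => d
        let c1 := PySem.Set.add c x
        (pvGoA f x (c1, a1, d1, k)).bind (fun s2 => pvAncA f n s2)
      | none => some (c, a.erase n, d, k)
    | none => some (c, a, d, k)

-- `while node in descendants and len(descendants[node]) > 0: …` and the final key deletion
def pvDescA : Nat → Int → pvSt → Option pvSt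
  | 0, _, _ => none
  | f+1, n, (c, a, d, k) =>
    match d.get? n with
    | some l =>
      match PySem.List.pop? l with
      | some (x, l') =>
        let d1 := d.insert n l'
        let a1 := match a.get? x with
          | some m => if m.contains n then a.insert x ((PySem.List.remove? m n).getD m) else a
          | none => a
        let c1 := if c.contains x then c else PySem.Set.add c x
        let k1 := if c.contains x then k else k + 1
        (pvGoA f x (c1, a1, d1, k1)).bind (fun s2 => pvDescA f n s2)
      | none => some (c, a, d.erase n, k)
    | none => some (c, a, d, k)
end

def addNeighbors (connected : List Int) (node : Int) (ancestors : List (Int × List Int)) (descendants : List (Int × List Int)) (countReorders : Int) : Int :=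
  match pvGoA (pvFuelA ancestors descendants) node (connected, PySem.Dict.mk ancestors, PySem.Dict.mk descendants, countReorders) with
  | some (_, _, _, k) => k
  | none => countReorders   -- fuel exhaustion: unreachable under Pre_ (proved below)

-- ===== PORT B =====
-- Source B's stack machine; a frame is (node, descPhase). The phase only selects which dict is
-- primary: pvPack rebuilds the state, pvNext is the phase transition of the else branch.
def pvPack (ph : Bool) (c : List Int) (prim sec : PySem.Dict Int (List Int)) (k : Int) : pvSt :=
  if ph then (c, sec, prim, k) else (c, prim, sec, k)

def pvNext (n : Int) (ph : Bool) (rest : List (Int × Bool)) : List (Int × Bool) :=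
  if ph then rest else (n, true) :: rest

def pvGoB : Nat → List (Int × Bool) → pvSt → Option pvSt
  | 0, _, _ => none
  | _+1, [], s => some s
  | f+1, (n, ph) :: rest, (c, a, d, k) =>
    let prim := if ph then d else a
    let sec  := if ph then a else d
    match prim.get? n with
    | some l =>
      match PySem.List.pop? l with
      | some (x, l') =>
        -- `x = prim[n].pop(); if x in sec and n in sec[x]: sec[x].remove(n)`
        let prim1 := prim.insert n l'
        let sec1 := match sec.get? x with
          | some m => if m.contains n then sec.insert x ((PySem.List.remove? m n).getD m) else sec
          | none => sec
        -- `if x not in connected: connected.add(x); if descPhase: countReorders += 1`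
        let c1 := if c.contains x then c else PySem.Set.add c x
        let k1 := if c.contains x then k else if ph then k + 1 else k
        pvGoB f ((x, false) :: (n, ph) :: rest) (pvPack ph c1 prim1 sec1 k1)
      | none => pvGoB f (pvNext n ph rest) (pvPack ph c (prim.erase n) sec k)
    | none => pvGoB f (pvNext n ph rest) (c, a, d, k)

def addNeighbors_alt (connected : List Int) (node : Int) (ancestors : List (Int × List Int)) (descendants : List (Int × List Int)) (countReorders : Int) : Int :=
  match pvGoB (3 ^ pvFuelA ancestors descendants + 1) [(node, false)] (connected, PySem.Dict.mk ancestors, PySem.Dict.mk descendants, countReorders) with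
  | some (_, _, _, k) => k
  | none => countReorders   -- fuel exhaustion: unreachable under Pre_ (proved below)

-- ===== PRECONDITION & SPEC =====
-- Pre_ excludes association lists with duplicate keys: they do not represent any Python dict
-- (a Python dict always has distinct keys), so no input A returns on is excluded.
def Pre_addNeighbors (connected : List Int) (node : Int) (ancestors : List (Int × List Int)) (descendants : List (Int × List Int)) (countReorders : Int) : Prop :=
  (ancestors.map Prod.fst).Nodup ∧ (descendants.map Prod.fst).Nodup
instance (connected : List Int) (node : Int) (ancestors : List (Int × List Int)) (descendants : List (Int × List Int)) (countReorders : Int) : Decidable (Pre_addNeighbors connected node ancestors descendants countReorders) := by unfold Pre_addNeighbors; infer_instance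

def pvWitness_addNeighbors : List Int × Int × (List (Int × List Int)) × (List (Int × List Int)) × Int :=
  ([], 0, [(0, [1]), (1, [])], [(1, [0]), (2, [1])], 0)

def Spec_addNeighbors (connected : List Int) (node : Int) (ancestors : List (Int × List Int)) (descendants : List (Int × List Int)) (countReorders : Int) (out : Int) : Prop := out = addNeighbors_alt connected node ancestors descendants countReorders
instance (connected : List Int) (node : Int) (ancestors : List (Int × List Int)) (descendants : List (Int × List Int)) (countReorders : Int) (out : Int) : Decidable (Spec_addNeighbors connected node ancestors descendants countReorders out) := by unfold Spec_addNeighbors; infer_instance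

-- ===== CLAIM (what is proved, stated in full; the proofs are below) =====
def Claim_equal_addNeighbors : Prop := ∀ (connected : List Int) (node : Int) (ancestors : List (Int × List Int)) (descendants : List (Int × List Int)) (countReorders : Int), Dom_addNeighbors connected node ancestors descendants countReorders → Pre_addNeighbors connected node ancestors descendants countReorders → Spec_addNeighbors connected node ancestors descendants countReorders (addNeighbors connected node ancestors descendants countReorders)

-- ===== LEMMAS AND PROOFS =====

theorem pvSetAdd_if (c : List Int) (x : Int) :
    (if c.contains x then c else PySem.Set.add c x) = PySem.Set.add c x := by
  by_cases h : c.contains x <;> simp [PySem.Set.add, h]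

def pvSize' (d : PySem.Dict Int (List Int)) : Nat := (d.items.map (fun p => p.2.length)).sum

theorem pvSize_erase_le (d : PySem.Dict Int (List Int)) (k0 : Int) :
    pvSize' (d.erase k0) ≤ pvSize' d :=
  ((List.filter_sublist).map _).sum_le_sum (by simp)

theorem pvKeys_erase_nodup (d : PySem.Dict Int (List Int)) (k0 : Int) (h : d.keys.Nodup) :
    (d.erase k0).keys.Nodup :=
  ((List.filter_sublist).map _).nodup h

theorem pvGet?_le_size (d : PySem.Dict Int (List Int)) (k0 : Int) (l : List Int)
    (h : d.get? k0 = some l) : l.length ≤ pvSize' d := by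
  have hm := PySem.Dict.mem_items_of_get?_eq_some d h
  exact List.le_sum_of_mem (List.mem_map_of_mem hm)

theorem pvSumlen_replace (k0 : Int) (v : List Int) : ∀ (its : List (Int × List Int)),
    (its.map (fun x => x.1)).Nodup → ∀ pr, its.find? (fun p => p.1 == k0) = some pr →
    ((its.map (fun p => if p.1 == k0 then (k0, v) else p)).map (fun p => p.2.length)).sum + pr.2.length
      = (its.map (fun p => p.2.length)).sum + v.length := by
  intro its
  induction its with
  | nil => intro _ pr h; simp at h
  | cons p t ih =>
    intro hnd pr hf
    by_cases hpk : p.1 = k0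
    · have hb : (p.1 == k0) = true := by simp [hpk]
      simp only [List.find?_cons, hb] at hf
      injection hf with hf; subst hf
      have htail : t.map (fun q => if q.1 == k0 then (k0, v) else q) = t := by
        have : ∀ q ∈ t, (if (q.1 == k0) = true then (k0, v) else q) = id q := by
          intro q hq
          have hne : ¬ (q.1 == k0) = true := by
            simp only [beq_iff_eq]
            intro hc
            apply (List.nodup_cons.mp hnd).1
            have : q.1 ∈ List.map (fun x => x.1) t := List.mem_map_of_mem hq
            rwa [hc, ← hpk] at this
          simp [hne]
        rw [List.map_congr_left this, List.map_id]
      simp only [List.map_cons, hb, if_true, htail, List.sum_cons]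
      omega
    · have hb : ¬ (p.1 == k0) = true := by simp [hpk]
      simp only [List.find?_cons, hb] at hf
      have hih := ih (List.nodup_cons.mp hnd).2 pr hf
      simp only [List.map_cons, if_neg hb, List.sum_cons]
      omega

theorem pvSize_insert (d : PySem.Dict Int (List Int)) (k0 : Int) (v l : List Int)
    (hnd : d.keys.Nodup) (hg : d.get? k0 = some l) :
    pvSize' (d.insert k0 v) + l.length = pvSize' d + v.length := by
  have hc : d.contains k0 = true := by
    rw [PySem.Dict.contains_eq_isSome_get?, hg]; rfl
  obtain ⟨pr, hfind, hpr2⟩ : ∃ pr, d.items.find? (fun p => p.1 == k0) = some pr ∧ pr.2 = l := by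
    unfold PySem.Dict.get? at hg
    cases hf : d.items.find? (fun p => p.1 == k0) with
    | none => rw [hf] at hg; simp at hg
    | some pr => rw [hf] at hg; simp at hg; exact ⟨pr, rfl, hg⟩
  have hrep := pvSumlen_replace k0 v d.items hnd pr hfind
  rw [hpr2] at hrep
  unfold pvSize' PySem.Dict.insert
  rw [if_pos hc]
  exact hrep

theorem pvGoB_mono {g : Nat} {st : List (Int × Bool)} {s r : pvSt}
    (h : pvGoB g st s = some r) : pvGoB (g+1) st s = some r := by
  induction g generalizing st s with
  | zero => simp [pvGoB] at h
  | succ g ih =>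
    match st with
    | [] => simpa [pvGoB] using h
    | (n, ph) :: rest =>
      obtain ⟨c, a, d, k⟩ := s
      cases ph <;>
      · simp only [pvGoB, Bool.false_eq_true, if_false, if_true] at h ⊢
        first
        | (cases hga : (PySem.Dict.get? a n) with
           | none => simp only [hga] at h ⊢; exact ih h
           | some l =>
             simp only [hga] at h ⊢
             cases hp : PySem.List.pop? l with
             | none => simp only [hp] at h ⊢; exact ih h
             | some pr => obtain ⟨x, l'⟩ := pr; simp only [hp] at h ⊢; exact ih h)
        | (cases hgd : (PySem.Dict.get? d n) with
           | none => simp only [hgd] at h ⊢; exact ih h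
           | some l =>
             simp only [hgd] at h ⊢
             cases hp : PySem.List.pop? l with
             | none => simp only [hp] at h ⊢; exact ih h
             | some pr => obtain ⟨x, l'⟩ := pr; simp only [hp] at h ⊢; exact ih h)

theorem pvGoB_mono_le {g g' : Nat} {st : List (Int × Bool)} {s r : pvSt}
    (hle : g ≤ g') (h : pvGoB g st s = some r) : pvGoB g' st s = some r := by
  induction hle with
  | refl => exact h
  | step _ ih => exact pvGoB_mono ih

theorem pvSim (f : Nat) :
    (∀ n s s', pvGoA f n s = some s' → ∀ rest g r, pvGoB g rest s' = some r →
      pvGoB (3^f + g) ((n, false) :: rest) s = some r)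
    ∧ (∀ n s s', pvAncA f n s = some s' → ∀ rest g r, pvGoB g ((n, true) :: rest) s' = some r →
      pvGoB (3^f + g) ((n, false) :: rest) s = some r)
    ∧ (∀ n s s', pvDescA f n s = some s' → ∀ rest g r, pvGoB g rest s' = some r →
      pvGoB (3^f + g) ((n, true) :: rest) s = some r) := by
  induction f with
  | zero =>
    refine ⟨?_, ?_, ?_⟩ <;> intro n s s' hA <;> simp [pvGoA, pvAncA, pvDescA] at hA
  | succ f ih =>
    have hpos : 1 ≤ 3 ^ f := Nat.one_le_pow _ _ (by norm_num)
    have hps : (3:Nat) ^ (f+1) = 3 ^ f * 3 := pow_succ 3 f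
    refine ⟨?_, ?_, ?_⟩
    · intro n s s' hA rest g r hB
      simp only [pvGoA] at hA
      obtain ⟨s1, h1, h2⟩ := Option.bind_eq_some_iff.mp hA
      have hd := ih.2.2 n s1 s' h2 rest g r hB
      have ha := ih.2.1 n s s1 h1 rest (3^f + g) r hd
      exact pvGoB_mono_le (by omega) ha
    · intro n s s' hA rest g r hB
      obtain ⟨c, a, d, k⟩ := s
      obtain ⟨m, hm⟩ : ∃ m, 3^(f+1) + g = m + 1 := ⟨3^(f+1) + g - 1, by omega⟩
      rw [hm]
      simp only [pvAncA] at hA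
      cases hga : a.get? n
      · simp only [hga] at hA
        injection hA with hA; subst hA
        simp only [pvGoB, Bool.false_eq_true, if_false, hga, pvNext]
        exact pvGoB_mono_le (by omega) hB
      · rename_i l
        simp only [hga] at hA
        cases hp : PySem.List.pop? l
        · simp only [hp] at hA
          injection hA with hA; subst hA
          simp only [pvGoB, Bool.false_eq_true, if_false, hga, hp, pvNext, pvPack]
          exact pvGoB_mono_le (by omega) hB
        · rename_i pr; obtain ⟨x, l'⟩ := pr
          simp only [hp] at hA
          obtain ⟨s2, h1, h2⟩ := Option.bind_eq_some_iff.mp hA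
          have hcont := ih.2.1 n s2 s' h2 rest g r hB
          have hcall := ih.1 x _ s2 h1 ((n, false) :: rest) (3^f + g) r hcont
          simp only [pvGoB, Bool.false_eq_true, if_false, hga, hp, pvPack, pvSetAdd_if, ite_self]
          exact pvGoB_mono_le (by omega) hcall
    · intro n s s' hA rest g r hB
      obtain ⟨c, a, d, k⟩ := s
      obtain ⟨m, hm⟩ : ∃ m, 3^(f+1) + g = m + 1 := ⟨3^(f+1) + g - 1, by omega⟩
      rw [hm]
      simp only [pvDescA] at hA
      cases hgd : d.get? n
      · simp only [hgd] at hA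
        injection hA with hA; subst hA
        simp only [pvGoB, if_true, hgd, pvNext]
        exact pvGoB_mono_le (by omega) hB
      · rename_i l
        simp only [hgd] at hA
        cases hp : PySem.List.pop? l
        · simp only [hp] at hA
          injection hA with hA; subst hA
          simp only [pvGoB, if_true, hgd, hp, pvNext, pvPack]
          exact pvGoB_mono_le (by omega) hB
        · rename_i pr; obtain ⟨x, l'⟩ := pr
          simp only [hp] at hA
          obtain ⟨s2, h1, h2⟩ := Option.bind_eq_some_iff.mp hA
          have hcont := ih.2.2 n s2 s' h2 rest g r hB
          have hcall := ih.1 x _ s2 h1 ((n, true) :: rest) (3^f + g) r hcont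
          simp only [pvGoB, if_true, hgd, hp, pvPack]
          exact pvGoB_mono_le (by omega) hcall

theorem pvTerm : ∀ K : Nat,
    (∀ (c : List Int) (a d : PySem.Dict Int (List Int)) (k n : Int),
      a.keys.Nodup → d.keys.Nodup → pvSize' a + pvSize' d ≤ K → ∀ f, 2*K+2 ≤ f →
      ∃ c' a' d' k', pvGoA f n (c, a, d, k) = some (c', a', d', k') ∧
        a'.keys.Nodup ∧ d'.keys.Nodup ∧ pvSize' a' + pvSize' d' ≤ pvSize' a + pvSize' d)
    ∧ (∀ (c : List Int) (a d : PySem.Dict Int (List Int)) (k n : Int),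
      a.keys.Nodup → d.keys.Nodup → pvSize' a + pvSize' d ≤ K → ∀ f, 2*K+1 ≤ f →
      ∃ c' a' d' k', pvAncA f n (c, a, d, k) = some (c', a', d', k') ∧
        a'.keys.Nodup ∧ d'.keys.Nodup ∧ pvSize' a' + pvSize' d' ≤ pvSize' a + pvSize' d)
    ∧ (∀ (c : List Int) (a d : PySem.Dict Int (List Int)) (k n : Int),
      a.keys.Nodup → d.keys.Nodup → pvSize' a + pvSize' d ≤ K → ∀ f, 2*K+1 ≤ f →
      ∃ c' a' d' k', pvDescA f n (c, a, d, k) = some (c', a', d', k') ∧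
        a'.keys.Nodup ∧ d'.keys.Nodup ∧ pvSize' a' + pvSize' d' ≤ pvSize' a + pvSize' d) := by
  intro K
  induction K using Nat.strong_induction_on with
  | _ K IH =>
    have hAnc : ∀ (c : List Int) (a d : PySem.Dict Int (List Int)) (k n : Int),
        a.keys.Nodup → d.keys.Nodup → pvSize' a + pvSize' d ≤ K → ∀ f, 2*K+1 ≤ f →
        ∃ c' a' d' k', pvAncA f n (c, a, d, k) = some (c', a', d', k') ∧
          a'.keys.Nodup ∧ d'.keys.Nodup ∧ pvSize' a' + pvSize' d' ≤ pvSize' a + pvSize' d := by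
      intro c a d k n hna hnd hK f hf
      obtain ⟨g, rfl⟩ : ∃ g, f = g + 1 := ⟨f - 1, by omega⟩
      cases hga : a.get? n with
      | none => exact ⟨c, a, d, k, by simp [pvAncA, hga], hna, hnd, le_refl _⟩
      | some l =>
        cases hp : PySem.List.pop? l with
        | none =>
          refine ⟨c, a.erase n, d, k, by simp [pvAncA, hga, hp], pvKeys_erase_nodup a n hna, hnd, ?_⟩
          have := pvSize_erase_le a n; omega
        | some pr =>
          obtain ⟨x, l'⟩ := pr
          have hll : l'.length + 1 = l.length := PySem.List.length_of_pop?_eq_some l hp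
          have hle : l.length ≤ pvSize' a := pvGet?_le_size a n l hga
          have ha1 : pvSize' (a.insert n l') + l.length = pvSize' a + l'.length :=
            pvSize_insert a n l' l hna hga
          have hna1 : (a.insert n l').keys.Nodup := PySem.Dict.nodup_keys_insert a n l' hna
          have hd1 : ∃ d1, (match d.get? x with
              | some m => if m.contains n then d.insert x ((PySem.List.remove? m n).getD m) else d
              | none => d) = d1 ∧ d1.keys.Nodup ∧ pvSize' d1 ≤ pvSize' d := by
            cases hgd : d.get? x with
            | none => exact ⟨d, rfl, hnd, le_refl _⟩
            | some m =>
              by_cases hm : m.contains n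
              · have hmem : n ∈ m := List.mem_of_elem_eq_true hm
                have hrw : PySem.List.remove? m n = some (m.erase n) :=
                  PySem.List.remove?_eq_some_erase m n hmem
                have hsz : pvSize' (d.insert x (m.erase n)) + m.length = pvSize' d + (m.erase n).length :=
                  pvSize_insert d x _ m hnd hgd
                have hlen : (m.erase n).length ≤ m.length := by
                  rw [List.length_erase]; split <;> omega
                exact ⟨d.insert x (m.erase n), by simp only [if_pos hm, hrw, Option.getD_some],
                  PySem.Dict.nodup_keys_insert d x _ hnd, by omega⟩
              · exact ⟨d, by simp only [if_neg hm], hnd, le_refl _⟩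
          obtain ⟨d1, hd1eq, hnd1, hszd1⟩ := hd1
          have hKpos : 1 ≤ K := by omega
          have hK1 : K - 1 < K := by omega
          have hsz1 : pvSize' (a.insert n l') + pvSize' d1 ≤ K - 1 := by omega
          obtain ⟨c2, a2, d2, k2, hgo, hna2, hnd2, hsz2⟩ :=
            (IH (K-1) hK1).1 (PySem.Set.add c x) (a.insert n l') d1 k x hna1 hnd1 hsz1 g (by omega)
          obtain ⟨c3, a3, d3, k3, hanc, hna3, hnd3, hsz3⟩ :=
            (IH (K-1) hK1).2.1 c2 a2 d2 k2 n hna2 hnd2 (by omega) g (by omega)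
          refine ⟨c3, a3, d3, k3, ?_, hna3, hnd3, by omega⟩
          simp only [pvAncA, hga, hp]
          rw [hd1eq, hgo]
          simpa using hanc
    have hDesc : ∀ (c : List Int) (a d : PySem.Dict Int (List Int)) (k n : Int),
        a.keys.Nodup → d.keys.Nodup → pvSize' a + pvSize' d ≤ K → ∀ f, 2*K+1 ≤ f →
        ∃ c' a' d' k', pvDescA f n (c, a, d, k) = some (c', a', d', k') ∧
          a'.keys.Nodup ∧ d'.keys.Nodup ∧ pvSize' a' + pvSize' d' ≤ pvSize' a + pvSize' d := by
      intro c a d k n hna hnd hK f hf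
      obtain ⟨g, rfl⟩ : ∃ g, f = g + 1 := ⟨f - 1, by omega⟩
      cases hgd : d.get? n with
      | none => exact ⟨c, a, d, k, by simp [pvDescA, hgd], hna, hnd, le_refl _⟩
      | some l =>
        cases hp : PySem.List.pop? l with
        | none =>
          refine ⟨c, a, d.erase n, k, by simp [pvDescA, hgd, hp], hna, pvKeys_erase_nodup d n hnd, ?_⟩
          have := pvSize_erase_le d n; omega
        | some pr =>
          obtain ⟨x, l'⟩ := pr
          have hll : l'.length + 1 = l.length := PySem.List.length_of_pop?_eq_some l hp
          have hle : l.length ≤ pvSize' d := pvGet?_le_size d n l hgd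
          have hd1 : pvSize' (d.insert n l') + l.length = pvSize' d + l'.length :=
            pvSize_insert d n l' l hnd hgd
          have hnd1 : (d.insert n l').keys.Nodup := PySem.Dict.nodup_keys_insert d n l' hnd
          have ha1 : ∃ a1, (match a.get? x with
              | some m => if m.contains n then a.insert x ((PySem.List.remove? m n).getD m) else a
              | none => a) = a1 ∧ a1.keys.Nodup ∧ pvSize' a1 ≤ pvSize' a := by
            cases hgax : a.get? x with
            | none => exact ⟨a, rfl, hna, le_refl _⟩
            | some m =>
              by_cases hm : m.contains n
              · have hmem : n ∈ m := List.mem_of_elem_eq_true hm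
                have hrw : PySem.List.remove? m n = some (m.erase n) :=
                  PySem.List.remove?_eq_some_erase m n hmem
                have hsz : pvSize' (a.insert x (m.erase n)) + m.length = pvSize' a + (m.erase n).length :=
                  pvSize_insert a x _ m hna hgax
                have hlen : (m.erase n).length ≤ m.length := by
                  rw [List.length_erase]; split <;> omega
                exact ⟨a.insert x (m.erase n), by simp only [if_pos hm, hrw, Option.getD_some],
                  PySem.Dict.nodup_keys_insert a x _ hna, by omega⟩
              · exact ⟨a, by simp only [if_neg hm], hna, le_refl _⟩
          obtain ⟨a1, ha1eq, hna1, hsza1⟩ := ha1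
          have hKpos : 1 ≤ K := by omega
          have hK1 : K - 1 < K := by omega
          have hsz1 : pvSize' a1 + pvSize' (d.insert n l') ≤ K - 1 := by omega
          obtain ⟨c2, a2, d2, k2, hgo, hna2, hnd2, hsz2⟩ :=
            (IH (K-1) hK1).1 (if c.contains x then c else PySem.Set.add c x) a1 (d.insert n l')
              (if c.contains x then k else k + 1) x hna1 hnd1 hsz1 g (by omega)
          obtain ⟨c3, a3, d3, k3, hdesc, hna3, hnd3, hsz3⟩ :=
            (IH (K-1) hK1).2.2 c2 a2 d2 k2 n hna2 hnd2 (by omega) g (by omega)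
          refine ⟨c3, a3, d3, k3, ?_, hna3, hnd3, by omega⟩
          simp only [pvDescA, hgd, hp]
          rw [ha1eq, hgo]
          simpa using hdesc
    refine ⟨?_, hAnc, hDesc⟩
    intro c a d k n hna hnd hK f hf
    obtain ⟨g, rfl⟩ : ∃ g, f = g + 1 := ⟨f - 1, by omega⟩
    obtain ⟨c1, a1, d1, k1, hanc, hna1, hnd1, hsz1⟩ := hAnc c a d k n hna hnd hK g (by omega)
    obtain ⟨c2, a2, d2, k2, hdesc, hna2, hnd2, hsz2⟩ := hDesc c1 a1 d1 k1 n hna1 hnd1 (by omega) g (by omega)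
    refine ⟨c2, a2, d2, k2, ?_, hna2, hnd2, by omega⟩
    simp only [pvGoA]
    rw [hanc]
    simpa using hdesc

-- ===== VERDICT (by name: the statement is the Claim_ definition above) =====
theorem addNeighbors_spec : Claim_equal_addNeighbors := by
  unfold Claim_equal_addNeighbors
  intro connected node ancestors descendants countReorders _hDom hPre
  obtain ⟨hna, hnd⟩ := hPre
  unfold Spec_addNeighbors
  have hkeysa : (PySem.Dict.mk ancestors).keys.Nodup := hna
  have hkeysd : (PySem.Dict.mk descendants).keys.Nodup := hnd
  have hFuel : pvFuelA ancestors descendants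
      = 2 * (pvSize' (PySem.Dict.mk ancestors) + pvSize' (PySem.Dict.mk descendants)) + 2 := rfl
  obtain ⟨c', a', d', k', hgo, -, -, -⟩ :=
    (pvTerm (pvSize' (PySem.Dict.mk ancestors) + pvSize' (PySem.Dict.mk descendants))).1
      connected (PySem.Dict.mk ancestors) (PySem.Dict.mk descendants) countReorders node
      hkeysa hkeysd (le_refl _) _ (le_of_eq hFuel.symm)
  have hB1 : pvGoB 1 [] (c', a', d', k') = some (c', a', d', k') := by simp [pvGoB]
  have hsim := (pvSim (pvFuelA ancestors descendants)).1 node _ _ hgo [] 1 _ hB1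
  have e1 : addNeighbors connected node ancestors descendants countReorders = k' := by
    unfold addNeighbors
    rw [hgo]
  have e2 : addNeighbors_alt connected node ancestors descendants countReorders = k' := by
    unfold addNeighbors_alt
    rw [hsim]
  rw [e1, e2]
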